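-- pv_equiv track=rewrite | github.com/ZhidongZhang-code/Z-Precise-alignment | old-Z-precise-alignment/整体流程整理.py | find_end_position
-- ===== SOURCE A (Python) =====
-- def find_end_position(alignment, sequence_id):
--     """
--     查找序列在多序列比对结果中的结束位置。
--
--     Args:
--         alignment (dict): 多序列比对结果，格式为序列ID到序列的映射字典。
--         sequence_id (str): 要查找的序列ID。
--
--     Returns:
--         int: 结束位置。
--     """
--     sequence = alignment[sequence_id]
--     end_position = None
--     for i in range(len(sequence) - 1, -1, -1):
--         if sequence[i] != '-':
--             end_position = i + 3  # 找到最后一个非'-'的位置后，往后数三位作为结束位置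
--             break
--     return end_position
-- ===== SOURCE B (Python) =====
-- def find_end_position(alignment, sequence_id):
--     sequence = alignment[sequence_id]
--     end_position = None
--     for i, ch in enumerate(sequence):
--         if ch != '-':
--             end_position = i + 3
--     return end_position
-- ===== Notes on version B (the rewrite author's own statement) =====
-- stated objective: alternative
-- what changed: Replaces A's backward index scan with early break by a single forward pass that folds over the characters with an accumulator, overwriting the result at every non-gap character so the last non-gap position wins (no reverse range, no break).
import Mathlib
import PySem

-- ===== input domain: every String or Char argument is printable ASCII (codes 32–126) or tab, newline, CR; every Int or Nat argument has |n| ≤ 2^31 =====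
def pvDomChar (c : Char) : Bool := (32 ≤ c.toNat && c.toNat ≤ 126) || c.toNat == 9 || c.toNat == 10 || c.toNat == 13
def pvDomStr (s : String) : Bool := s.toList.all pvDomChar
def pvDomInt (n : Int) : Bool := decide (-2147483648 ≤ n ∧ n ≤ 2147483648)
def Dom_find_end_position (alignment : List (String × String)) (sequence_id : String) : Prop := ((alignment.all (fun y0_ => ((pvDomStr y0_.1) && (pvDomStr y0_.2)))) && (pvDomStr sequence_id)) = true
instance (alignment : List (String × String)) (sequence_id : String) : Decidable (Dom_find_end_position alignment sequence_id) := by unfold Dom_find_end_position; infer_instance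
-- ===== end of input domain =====

-- B replaces A's backward index scan with early break by a single forward pass with an
-- accumulator: every non-gap character overwrites the result, so the last one wins. Objective: alternative.

-- ===== PORT A =====
-- the 'for i in range(len(sequence)-1, -1, -1): if sequence[i] != '-': end_position = i+3; break' loop;
-- 'none' in the index-lookup branch models IndexError (unreachable: every i is in range)
def pvLoopA (cs : List Char) : List Int → Option Int
  | [] => none
  | i :: rest =>
    match PySem.List.pyGet? cs i with
    | none => none
    | some c => if c ≠ '-' then some (i + 3) else pvLoopA cs rest

def find_end_position (alignment : List (String × String)) (sequence_id : String) : Option Int :=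
  -- alignment[sequence_id]: first-match lookup in the association list (KeyError excluded by Pre_)
  match alignment.find? (fun p => p.1 == sequence_id) with
  | none => none
  | some p =>
    let sequence := p.2.toList
    pvLoopA sequence (PySem.List.pyRange ((sequence.length : Int) - 1) (-1) (-1))

-- ===== PORT B =====
-- the 'for i, ch in enumerate(sequence): if ch != '-': end_position = i + 3' loop:
-- forward pass carrying the current index and the accumulator
def pvLoopB (i : Int) (acc : Option Int) : List Char → Option Int
  | [] => acc
  | c :: rest => pvLoopB (i + 1) (if c ≠ '-' then some (i + 3) else acc) rest

def find_end_position_alt (alignment : List (String × String)) (sequence_id : String) : Option Int :=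
  match alignment.find? (fun p => p.1 == sequence_id) with
  | none => none
  | some p => pvLoopB 0 none p.2.toList

-- ===== PRECONDITION & SPEC =====
-- Pre_ excludes exactly the inputs where alignment[sequence_id] raises KeyError (id not present)
def Pre_find_end_position (alignment : List (String × String)) (sequence_id : String) : Prop :=
  (alignment.any (fun p => p.1 == sequence_id)) = true
instance (alignment : List (String × String)) (sequence_id : String) : Decidable (Pre_find_end_position alignment sequence_id) := by unfold Pre_find_end_position; infer_instance

def pvWitness_find_end_position : (List (String × String)) × String := ([("id1", "AC--")], "id1")

def Spec_find_end_position (alignment : List (String × String)) (sequence_id : String) (out : Option Int) : Prop := out = find_end_position_alt alignment sequence_id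
instance (alignment : List (String × String)) (sequence_id : String) (out : Option Int) : Decidable (Spec_find_end_position alignment sequence_id out) := by unfold Spec_find_end_position; infer_instance

-- ===== CLAIM (what is proved, stated in full; the proofs are below) =====
def Claim_equal_find_end_position : Prop := ∀ (alignment : List (String × String)) (sequence_id : String), Dom_find_end_position alignment sequence_id → Pre_find_end_position alignment sequence_id → Spec_find_end_position alignment sequence_id (find_end_position alignment sequence_id)

-- ===== LEMMAS AND PROOFS =====

-- pyRange(n-1, -1, -1) = [n-1, n-2, ..., 0]
theorem pv_pyRange_down (n : Nat) :
    PySem.List.pyRange ((n : Int) - 1) (-1) (-1)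
      = (List.range n).map (fun k : Nat => (n : Int) - 1 - (k : Int)) := by
  simp only [PySem.List.pyRange]
  rw [if_neg (by norm_num), if_neg (by norm_num)]
  cases n with
  | zero => rw [if_neg (by norm_num)]; simp
  | succ m =>
    rw [if_pos (by push_cast; omega)]
    have hc : (((((m + 1 : Nat)) : Int) - 1 - -1 + - -1 - 1) / - -1).toNat = m + 1 := by
      push_cast; norm_num
    rw [hc]
    apply List.map_congr_left
    intro k _
    ring

theorem pv_pyRange_down_succ (n : Nat) :
    PySem.List.pyRange (((n + 1 : Nat) : Int) - 1) (-1) (-1)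
      = (n : Int) :: PySem.List.pyRange ((n : Int) - 1) (-1) (-1) := by
  rw [pv_pyRange_down, pv_pyRange_down, List.range_succ_eq_map, List.map_cons, List.map_map]
  refine congrArg₂ List.cons (by push_cast; ring) ?_
  apply List.map_congr_left
  intro k _
  simp only [Function.comp_apply, Nat.succ_eq_add_one]
  push_cast
  ring

theorem pv_pyRange_down_zero :
    PySem.List.pyRange (((0 : Nat) : Int) - 1) (-1) (-1) = [] := by decide

-- appending one element past all scanned indices does not change A's loop
theorem pv_loopA_extend (xs : List Char) (y : Char) :
    ∀ n : Nat, n ≤ xs.length →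
      pvLoopA (xs ++ [y]) (PySem.List.pyRange ((n : Int) - 1) (-1) (-1))
        = pvLoopA xs (PySem.List.pyRange ((n : Int) - 1) (-1) (-1)) := by
  intro n
  induction n with
  | zero => intro _; rw [pv_pyRange_down_zero]; simp [pvLoopA]
  | succ m ih =>
    intro hle
    have hm : m < xs.length := by omega
    rw [pv_pyRange_down_succ]
    simp only [pvLoopA, PySem.List.pyGet?_natCast]
    rw [List.getElem?_append_left hm]
    cases hx : xs[m]? with
    | none =>
      have := List.getElem?_eq_none_iff.mp hx
      omega
    | some c =>
      show (if c ≠ '-' then some ((m : Int) + 3)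
            else pvLoopA (xs ++ [y]) (PySem.List.pyRange ((m : Int) - 1) (-1) (-1)))
          = (if c ≠ '-' then some ((m : Int) + 3)
            else pvLoopA xs (PySem.List.pyRange ((m : Int) - 1) (-1) (-1)))
      by_cases hc : c = '-'
      · subst hc
        rw [if_neg (by decide), if_neg (by decide)]
        exact ih (by omega)
      · rw [if_pos hc, if_pos hc]

-- A's backward scan over rev.reverse as a closed form over rev.dropWhile (· == '-')
theorem pv_keyA (rev : List Char) :
    pvLoopA rev.reverse (PySem.List.pyRange ((rev.length : Int) - 1) (-1) (-1))
      = (if (rev.dropWhile (· == '-')) = [] then none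
         else some (((rev.dropWhile (· == '-')).length : Int) + 2)) := by
  induction rev with
  | nil => decide
  | cons c rest ih =>
    simp only [List.reverse_cons, List.length_cons]
    rw [pv_pyRange_down_succ]
    simp only [pvLoopA]
    have hget : PySem.List.pyGet? (rest.reverse ++ [c]) ((rest.length : Nat) : Int) = some c := by
      rw [show ((rest.length : Nat) : Int) = ((rest.reverse.length : Nat) : Int) from by simp]
      exact PySem.List.pyGet?_append_length rest.reverse [] c
    rw [hget]
    show (if c ≠ '-' then some ((rest.length : Int) + 3)
          else pvLoopA (rest.reverse ++ [c]) (PySem.List.pyRange ((rest.length : Int) - 1) (-1) (-1)))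
        = _
    by_cases hc : c = '-'
    · subst hc
      rw [if_neg (by decide)]
      rw [pv_loopA_extend rest.reverse '-' rest.length (by simp), ih]
      have hdw : List.dropWhile (fun x => x == '-') ('-' :: rest)
          = List.dropWhile (fun x => x == '-') rest := by
        simp
      rw [hdw]
    · have hbc : (c == '-') = false := by simpa using hc
      rw [if_pos hc]
      have hdw : List.dropWhile (fun x => x == '-') (c :: rest) = c :: rest := by
        simp [hbc]
      rw [hdw, if_neg (by simp), List.length_cons]
      simp only [Option.some.injEq]
      push_cast
      ring

-- B's forward fold processes an appended last character last
theorem pv_loopB_append (xs : List Char) (y : Char) :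
    ∀ (i : Int) (acc : Option Int),
      pvLoopB i acc (xs ++ [y])
        = (if y ≠ '-' then some (i + (xs.length : Int) + 3) else pvLoopB i acc xs) := by
  induction xs with
  | nil => intro i acc; simp [pvLoopB]
  | cons c rest ih =>
    intro i acc
    simp only [List.cons_append, pvLoopB]
    rw [ih]
    by_cases hy : y = '-'
    · simp [hy]
    · rw [if_pos hy, if_pos hy, List.length_cons]
      congr 1
      push_cast
      ring

-- B's forward fold as the same closed form
theorem pv_keyB (rev : List Char) :
    pvLoopB 0 none rev.reverse
      = (if (rev.dropWhile (· == '-')) = [] then none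
         else some (((rev.dropWhile (· == '-')).length : Int) + 2)) := by
  induction rev with
  | nil => decide
  | cons c rest ih =>
    rw [List.reverse_cons, pv_loopB_append rest.reverse c 0 none]
    by_cases hc : c = '-'
    · subst hc
      rw [if_neg (by decide), ih]
      have hdw : List.dropWhile (fun x => x == '-') ('-' :: rest)
          = List.dropWhile (fun x => x == '-') rest := by simp
      rw [hdw]
    · have hbc : (c == '-') = false := by simpa using hc
      rw [if_pos hc]
      have hdw : List.dropWhile (fun x => x == '-') (c :: rest) = c :: rest := by
        simp [hbc]
      rw [hdw, if_neg (by simp), List.length_cons, List.length_reverse]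
      simp only [Option.some.injEq]
      push_cast
      ring

-- ===== VERDICT (by name: the statement is the Claim_ definition above) =====
theorem find_end_position_spec : Claim_equal_find_end_position := by
  intro alignment sequence_id _ hpre
  unfold Spec_find_end_position find_end_position find_end_position_alt
  cases hfind : alignment.find? (fun p => p.1 == sequence_id) with
  | none =>
    exfalso
    unfold Pre_find_end_position at hpre
    rw [List.any_eq_true] at hpre
    obtain ⟨p, hp, hpk⟩ := hpre
    have hs : (alignment.find? (fun p => p.1 == sequence_id)).isSome = true :=
      List.find?_isSome.mpr ⟨p, hp, hpk⟩
    rw [hfind] at hs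
    simp at hs
  | some p =>
    simp only
    have hkA := pv_keyA p.2.toList.reverse
    have hkB := pv_keyB p.2.toList.reverse
    rw [List.reverse_reverse, List.length_reverse] at hkA
    rw [List.reverse_reverse] at hkB
    rw [hkA, hkB]
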